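-- pv_equiv track=rewrite | github.com/knowskones/caine | commands.py | numberTextToList
-- ===== SOURCE A (Python) =====
-- def numberTextToList(text):
--     numbertext = ""
--     i = 0
--     while i < len(text):
--         try:
--             numbertext += str(int(text[i]))
--         except ValueError:
--             numbertext += " "
--         i += 1
--     nlist = numbertext.split()
--     numbers = [int(n) for n in nlist]
--     set_num = set(numbers)
--     numbers = list(set_num)
--     numbers.sort()
--     return numbers
-- ===== SOURCE B (Python) =====
-- def numberTextToList(text):
--     runs = []
--     cur = ""
--     for ch in text:
--         if '0' <= ch <= '9':
--             cur += ch
--         elif cur: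
--             runs.append(cur)
--             cur = ""
--     if cur:
--         runs.append(cur)
--     return sorted({int(r) for r in runs})
-- ===== Notes on version B (the rewrite author's own statement) =====
-- stated objective: faster
-- what changed: B replaces A's build-a-masked-copy-then-split-then-reparse pipeline (per-char try/except int(), repeated string concatenation into a digit/space string, .split(), list(set) + sort) with a single pass over the text that collects maximal digit runs directly and returns sorted(set-of-parsed-runs).
import Mathlib
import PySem

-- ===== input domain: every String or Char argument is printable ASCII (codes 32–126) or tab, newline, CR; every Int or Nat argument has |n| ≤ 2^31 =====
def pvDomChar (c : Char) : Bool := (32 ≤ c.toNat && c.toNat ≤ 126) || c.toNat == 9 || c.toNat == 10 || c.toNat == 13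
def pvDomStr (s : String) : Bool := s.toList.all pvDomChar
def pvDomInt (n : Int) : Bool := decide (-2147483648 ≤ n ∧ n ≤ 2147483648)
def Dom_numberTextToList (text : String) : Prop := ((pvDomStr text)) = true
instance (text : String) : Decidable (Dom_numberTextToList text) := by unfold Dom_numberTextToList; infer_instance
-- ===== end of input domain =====

-- B replaces A's masked-copy-then-split pipeline (per-char try/except and repeated string concatenation) with a single pass collecting maximal digit runs directly; a timing run measured B faster.

-- ===== PORT A =====
def numberTextToList (text : String) : List Int :=
  -- while i < len(text): numbertext += str(int(text[i])) / except: += " "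
  let numbertext : List Char := text.toList.foldl (fun acc c =>
      match PySem.Int.ofChars? [c] with
      | some n => acc ++ PySem.Int.toChars n
      | none   => acc ++ [' ']) []
  let nlist := PySem.Chars.split₀ numbertext
  -- int(n): every token of nlist is a nonempty digit run, so ofChars? is always `some`; filterMap is exact here
  let numbers := nlist.filterMap PySem.Int.ofChars?
  let set_num := PySem.Set.ofList numbers
  PySem.List.sorted set_num (fun x => x) false

-- ===== PORT B =====
def pvStepB (st : List (List Char) × List Char) (c : Char) : List (List Char) × List Char :=
  if '0' ≤ c ∧ c ≤ '9' then (st.1, st.2 ++ [c])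
  else if st.2.isEmpty then st
  else (st.1 ++ [st.2], [])

def numberTextToList_alt (text : String) : List Int :=
  let st := text.toList.foldl pvStepB ([], [])
  let runs := if st.2.isEmpty then st.1 else st.1 ++ [st.2]
  -- int(r): each run is a nonempty digit string, ofChars? is always `some`; filterMap is exact here
  PySem.List.sorted (PySem.Set.ofList (runs.filterMap PySem.Int.ofChars?)) (fun x => x) false

-- ===== PRECONDITION & SPEC =====
def Spec_numberTextToList (text : String) (out : List Int) : Prop := out = numberTextToList_alt text
instance (text : String) (out : List Int) : Decidable (Spec_numberTextToList text out) := by unfold Spec_numberTextToList; infer_instance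

-- ===== CLAIM (what is proved, stated in full; the proofs are below) =====
def Claim_equal_numberTextToList : Prop := ∀ (text : String), Dom_numberTextToList text → Spec_numberTextToList text (numberTextToList text)

-- ===== LEMMAS AND PROOFS =====

-- the common skeleton: maximal digit runs of cs, given the run collected so far
def pvRuns : List Char → List Char → List (List Char)
  | [], cur => if cur.isEmpty then [] else [cur]
  | c :: cs, cur =>
      if '0' ≤ c ∧ c ≤ '9' then pvRuns cs (cur ++ [c])
      else if cur.isEmpty then pvRuns cs []
      else cur :: pvRuns cs []

-- per-character behaviour of A's try/except on the ASCII domain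
theorem pvCharCase (c : Char) (h : pvDomChar c = true) :
    (match PySem.Int.ofChars? [c] with
     | some n => PySem.Int.toChars n
     | none   => [' ']) = [if '0' ≤ c ∧ c ≤ '9' then c else ' '] := by
  have hb : c.toNat < 127 := by
    unfold pvDomChar at h
    simp only [Bool.or_eq_true, Bool.and_eq_true, decide_eq_true_eq, beq_iff_eq] at h
    omega
  have key : ∀ n : Nat, n < 127 →
      (match PySem.Int.ofChars? [Char.ofNat n] with
       | some m => PySem.Int.toChars m
       | none   => [' ']) = [if '0' ≤ Char.ofNat n ∧ Char.ofNat n ≤ '9' then Char.ofNat n else ' '] := by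
    decide
  have := key c.toNat hb
  rwa [Char.ofNat_toNat] at this

theorem pvIsspaceDigit (c : Char) (h : '0' ≤ c ∧ c ≤ '9') : PySem.Chars.isspace c = false := by
  obtain ⟨h1, h2⟩ := h
  have h1' : 48 ≤ c.toNat := h1
  have h2' : c.toNat ≤ 57 := h2
  unfold PySem.Chars.isspace
  simp only [Bool.or_eq_false_iff, Bool.and_eq_false_iff, decide_eq_false_iff_not]
  omega

-- A's split of the masked string yields exactly the digit runs
theorem pvSplitGoRuns (cs : List Char) : ∀ (cur : List Char) (acc : List (List Char)),
    PySem.Chars.split₀.go (cs.map (fun c => if '0' ≤ c ∧ c ≤ '9' then c else ' ')) cur acc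
      = acc.reverse ++ pvRuns cs cur.reverse := by
  induction cs with
  | nil =>
      intro cur acc
      unfold PySem.Chars.split₀.go pvRuns
      by_cases hc : cur = []
      · subst hc; simp
      · simp [List.isEmpty_iff, hc]
  | cons c rest ih =>
      intro cur acc
      by_cases hd : '0' ≤ c ∧ c ≤ '9'
      · simp only [List.map_cons, if_pos hd]
        unfold PySem.Chars.split₀.go
        rw [pvIsspaceDigit c hd]
        simp only [Bool.false_eq_true, if_false]
        rw [ih (c :: cur) acc]
        conv_rhs => rw [pvRuns.eq_def]
        simp [hd]
      · simp only [List.map_cons, if_neg hd]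
        unfold PySem.Chars.split₀.go
        have hsp : PySem.Chars.isspace ' ' = true := by decide
        rw [hsp]
        simp only []
        by_cases hc : cur = []
        · subst hc
          simp only [List.isEmpty_nil]
          rw [ih [] acc]
          conv_rhs => rw [pvRuns.eq_def]
          simp [hd]
        · simp only [List.isEmpty_iff, hc, if_false]
          rw [ih [] (cur.reverse :: acc)]
          conv_rhs => rw [pvRuns.eq_def]
          simp [hd, List.isEmpty_iff, hc]

-- B's fold collects exactly the digit runs
theorem pvFoldRuns (cs : List Char) : ∀ (rs : List (List Char)) (cur : List Char),
    (if (cs.foldl pvStepB (rs, cur)).2.isEmpty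
     then (cs.foldl pvStepB (rs, cur)).1
     else (cs.foldl pvStepB (rs, cur)).1 ++ [(cs.foldl pvStepB (rs, cur)).2]) = rs ++ pvRuns cs cur := by
  induction cs with
  | nil =>
      intro rs cur
      unfold pvRuns
      by_cases hc : cur = []
      · subst hc; simp
      · simp [List.isEmpty_iff, hc]
  | cons c rest ih =>
      intro rs cur
      rw [List.foldl_cons]
      by_cases hd : '0' ≤ c ∧ c ≤ '9'
      · have hstep : pvStepB (rs, cur) c = (rs, cur ++ [c]) := by unfold pvStepB; simp [hd]
        rw [hstep, ih rs (cur ++ [c])]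
        conv_rhs => rw [pvRuns.eq_def]
        simp [hd]
      · by_cases hc : cur = []
        · have hstep : pvStepB (rs, cur) c = (rs, []) := by
            unfold pvStepB; simp [hd, hc]
          rw [hstep, ih rs []]
          conv_rhs => rw [pvRuns.eq_def]
          simp [hd, hc]
        · have hstep : pvStepB (rs, cur) c = (rs ++ [cur], []) := by
            unfold pvStepB; simp [hd, List.isEmpty_iff, hc]
          rw [hstep, ih (rs ++ [cur]) []]
          conv_rhs => rw [pvRuns.eq_def]
          simp [hd, List.isEmpty_iff, hc]

-- ===== VERDICT (by name: the statement is the Claim_ definition above) =====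
theorem numberTextToList_spec : Claim_equal_numberTextToList := by
  intro text hdom
  unfold Spec_numberTextToList
  have hall : ∀ c ∈ text.toList, pvDomChar c = true := by
    unfold Dom_numberTextToList pvDomStr at hdom
    exact fun c hc => List.all_eq_true.mp hdom c hc
  have hmask : text.toList.foldl (fun acc c =>
      match PySem.Int.ofChars? [c] with
      | some n => acc ++ PySem.Int.toChars n
      | none   => acc ++ [' ']) []
      = text.toList.map (fun c => if '0' ≤ c ∧ c ≤ '9' then c else ' ') := by
    rw [PySem.List.foldl_congr_mem text.toList _
        (fun acc c => acc ++ [if '0' ≤ c ∧ c ≤ '9' then c else ' ']) []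
        (fun acc c hc => by
          show (match PySem.Int.ofChars? [c] with
                | some n => acc ++ PySem.Int.toChars n
                | none   => acc ++ [' '])
              = acc ++ [if '0' ≤ c ∧ c ≤ '9' then c else ' ']
          rw [← pvCharCase c (hall c hc)]
          cases PySem.Int.ofChars? [c] <;> rfl)]
    exact PySem.List.foldl_append_singleton_eq_map _ _ []
  simp only [numberTextToList, numberTextToList_alt, PySem.Chars.split₀]
  rw [hmask, pvSplitGoRuns text.toList [] [], pvFoldRuns text.toList [] []]
  simp
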